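-- pv_equiv track=rewrite | github.com/ByteTitan-star/LeetCode-ReStart | LeetCode-Day17/2270. 分割数组的方案数.py | waysToSplitArray
-- ===== SOURCE A (Python) =====
-- from typing import List
--
-- def waysToSplitArray(nums: List[int]) -> int:
--     n = len(nums)
--     ans = 0
--     left,right = [0]*n,[0]*n
--     for i in range(n):
--         if i == 0:
--             left[0] = nums[i]
--         else:
--             left[i] = nums[i] + left[i-1]
--     for j in range(n-1,-1,-1):
--         if j == n-1:
--             right[n-1] = nums[j]
--         else:
--             right[j] = nums[j] + right[j+1]
--     for k in range(0,n-1):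
--         if left[k] >= right[k+1]:
--             ans += 1
--
--     return ans
-- ===== SOURCE B (Python) =====
-- from typing import List
--
-- def waysToSplitArray(nums: List[int]) -> int:
--     total = sum(nums)
--     ans = 0
--     left_sum = 0
--     for x in nums[:-1]:
--         left_sum += x
--         if left_sum >= total - left_sum:
--             ans += 1
--     return ans
-- ===== Notes on version B (the rewrite author's own statement) =====
-- stated objective: simpler
-- what changed: Replaces the two materialized prefix/suffix arrays built in three index loops by a single forward sweep over nums[:-1] keeping just two scalars (total and a running left sum).
import Mathlib
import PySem

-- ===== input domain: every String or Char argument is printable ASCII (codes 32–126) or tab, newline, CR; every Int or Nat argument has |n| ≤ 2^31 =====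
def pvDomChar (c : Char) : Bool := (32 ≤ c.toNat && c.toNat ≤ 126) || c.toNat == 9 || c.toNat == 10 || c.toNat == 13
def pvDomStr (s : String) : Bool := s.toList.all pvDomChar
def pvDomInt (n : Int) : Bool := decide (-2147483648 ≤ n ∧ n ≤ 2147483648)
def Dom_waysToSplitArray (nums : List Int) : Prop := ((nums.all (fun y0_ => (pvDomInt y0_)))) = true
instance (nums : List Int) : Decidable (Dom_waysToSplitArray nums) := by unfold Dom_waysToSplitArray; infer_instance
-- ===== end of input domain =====

-- B replaces A's two materialized prefix/suffix arrays (three index loops) by one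
-- forward sweep over nums[:-1] keeping two scalars; simpler, O(1) extra space.

-- ===== PORT A =====
-- Loop bodies of A's three `for` loops, in A's branch order. All indices i, j, k
-- used by A stay inside 0..n-1, so `getD _ 0` reads exactly Python's nums[i]/left[i].
def pvLeftStep (nums : List Int) (L : List Int) (i : Nat) : List Int :=
  if i = 0 then L.set 0 (nums.getD 0 0)
  else L.set i (nums.getD i 0 + L.getD (i - 1) 0)

def pvRightStep (nums : List Int) (R : List Int) (j : Nat) : List Int :=
  if j = nums.length - 1 then R.set (nums.length - 1) (nums.getD j 0)
  else R.set j (nums.getD j 0 + R.getD (j + 1) 0)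

def waysToSplitArray (nums : List Int) : Int :=
  let n := nums.length
  let left := (List.range n).foldl (pvLeftStep nums) (List.replicate n 0)
  -- range(n-1, -1, -1) visits exactly the indices of range(n) in reverse order
  let right := ((List.range n).reverse).foldl (pvRightStep nums) (List.replicate n 0)
  (List.range (n - 1)).foldl
    (fun ans k => if left.getD k 0 ≥ right.getD (k + 1) 0 then ans + 1 else ans) 0

-- ===== PORT B =====
def waysToSplitArray_alt (nums : List Int) : Int :=
  let total := nums.foldl (· + ·) 0
  let st := nums.dropLast.foldl
    (fun (st : Int × Int) x =>
      let l := st.1 + x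
      (l, if l ≥ total - l then st.2 + 1 else st.2)) (0, 0)
  st.2

-- ===== PRECONDITION & SPEC =====
def Spec_waysToSplitArray (nums : List Int) (out : Int) : Prop := out = waysToSplitArray_alt nums
instance (nums : List Int) (out : Int) : Decidable (Spec_waysToSplitArray nums out) := by unfold Spec_waysToSplitArray; infer_instance

-- ===== CLAIM (what is proved, stated in full; the proofs are below) =====
def Claim_equal_waysToSplitArray : Prop := ∀ (nums : List Int), Dom_waysToSplitArray nums → Spec_waysToSplitArray nums (waysToSplitArray nums)

-- ===== LEMMAS AND PROOFS =====

-- prefix sums: pvPref nums k = sum of nums.take (k+1); pvSuf nums j = sum of nums.drop j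
def pvPref (nums : List Int) (k : Nat) : Int := (nums.take (k + 1)).sum
def pvSuf (nums : List Int) (j : Nat) : Int := (nums.drop j).sum

lemma pvPref_step (nums : List Int) (k : Nat) (hk : k < nums.length) :
    pvPref nums k = (nums.take k).sum + nums.getD k 0 := by
  unfold pvPref
  rw [List.take_add_one, List.sum_append, List.getElem?_eq_getElem hk]
  simp [List.getD, List.getElem?_eq_getElem hk]

lemma pvSuf_step (nums : List Int) (j : Nat) (hj : j < nums.length) :
    pvSuf nums j = nums.getD j 0 + pvSuf nums (j + 1) := by
  unfold pvSuf
  rw [List.drop_eq_getElem_cons hj, List.sum_cons]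
  simp [List.getD, List.getElem?_eq_getElem hj]

lemma pvSuf_eq_total_sub (nums : List Int) (k : Nat) :
    pvSuf nums k = nums.sum - (nums.take k).sum := by
  unfold pvSuf
  have h : (nums.take k).sum + (nums.drop k).sum = nums.sum := by
    rw [← List.sum_append, List.take_append_drop]
  omega

lemma pvLeft_len (nums : List Int) (l : List Int) (is : List Nat) :
    (is.foldl (pvLeftStep nums) l).length = l.length := by
  induction is generalizing l with
  | nil => rfl
  | cons i is ih =>
      simp only [List.foldl_cons]
      rw [ih]
      unfold pvLeftStep
      split <;> simp

lemma getD_set_ne (l : List Int) (i k : Nat) (v : Int) (h : i ≠ k) :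
    (l.set i v).getD k 0 = l.getD k 0 := by
  simp [List.getD, List.getElem?_set_ne h]

lemma getD_set_self (l : List Int) (i : Nat) (v : Int) (h : i < l.length) :
    (l.set i v).getD i 0 = v := by
  simp [List.getD, h]

-- left array invariant: after processing range m, entries k < m hold the prefix sums
lemma pvLeft_getD (nums : List Int) :
    ∀ m, m ≤ nums.length → ∀ k, k < m →
      (((List.range m).foldl (pvLeftStep nums) (List.replicate nums.length 0)).getD k 0)
        = pvPref nums k := by
  intro m
  induction m with
  | zero => intro _ k hk; omega
  | succ p ih =>
      intro hm k hk
      rw [List.range_succ, List.foldl_append]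
      simp only [List.foldl_cons, List.foldl_nil]
      set L := (List.range p).foldl (pvLeftStep nums) (List.replicate nums.length 0) with hL
      have hlen : L.length = nums.length := by
        rw [hL, pvLeft_len]; simp
      unfold pvLeftStep
      rcases Nat.lt_or_ge k p with hkp | hkp
      · -- entry k < p is untouched by the p-th step
        split
        · next h0 => omega
        · rw [getD_set_ne _ _ _ _ (by omega)]
          exact ih (by omega) k hkp
      · have hkp' : k = p := by omega
        subst hkp'
        split
        · next h0 =>
            rw [h0, getD_set_self _ _ _ (by omega)]
            rw [pvPref_step nums 0 (by omega)]
            simp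
        · next h0 =>
            rw [getD_set_self _ _ _ (by omega)]
            rw [pvPref_step nums k (by omega)]
            have h1 : k - 1 + 1 = k := by omega
            have := ih (by omega) (k - 1) (by omega)
            rw [this, pvPref, h1]
            ring

-- right array invariant: folding the reversed range fills entries downwards
lemma pvRight_getD (nums : List Int) :
    ∀ m, m ≤ nums.length → ∀ s : List Int, s.length = nums.length →
      (∀ j, m ≤ j → j < nums.length → s.getD j 0 = pvSuf nums j) →
      ∀ j, j < nums.length →
        ((((List.range m).reverse).foldl (pvRightStep nums) s).getD j 0) = pvSuf nums j := by
  intro m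
  induction m with
  | zero =>
      intro _ s hs hinv j hj
      simpa using hinv j (by omega) hj
  | succ p ih =>
      intro hm s hs hinv j hj
      have hrev : (List.range (p + 1)).reverse = p :: (List.range p).reverse := by
        rw [List.range_succ, List.reverse_append]; simp
      rw [hrev, List.foldl_cons]
      apply ih (by omega)
      · unfold pvRightStep; split <;> simp [hs]
      · intro j' hj' hj'2
        unfold pvRightStep
        rcases Nat.lt_or_ge p j' with hpj | hpj
        · -- j' > p : entry untouched by the step at p
          split
          · next h0 => rw [getD_set_ne _ _ _ _ (by omega)]; exact hinv j' (by omega) hj'2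
          · rw [getD_set_ne _ _ _ _ (by omega)]; exact hinv j' (by omega) hj'2
        · have hj'p : j' = p := by omega
          subst hj'p
          split
          · next h0 =>
              rw [h0, getD_set_self _ _ _ (by omega)]
              rw [← h0, pvSuf_step nums j' hj'2]
              have hnil : pvSuf nums (j' + 1) = 0 := by
                unfold pvSuf
                rw [List.drop_eq_nil_of_le (by omega)]
                rfl
              omega
          · next h0 =>
              rw [getD_set_self _ _ _ (by omega)]
              rw [pvSuf_step nums j' hj'2, hinv (j' + 1) (by omega) (by omega)]
      · exact hj

-- the count both loops compute, in B's structural form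
def pvCount (total : Int) : List Int → Int → Int
  | [], _ => 0
  | x :: xs, l =>
      (if l + x ≥ total - (l + x) then (1 : Int) else 0) + pvCount total xs (l + x)

-- B's pair fold computes pvCount
lemma pvB_loop (total : Int) :
    ∀ (xs : List Int) (l a : Int),
      (xs.foldl (fun (st : Int × Int) x =>
        let l' := st.1 + x
        (l', if l' ≥ total - l' then st.2 + 1 else st.2)) (l, a)).2
      = a + pvCount total xs l := by
  intro xs
  induction xs with
  | nil => intro l a; simp [pvCount]
  | cons x xs ih =>
      intro l a
      simp only [List.foldl_cons, pvCount]
      rw [ih]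
      split <;> ring

-- pvCount written as a sum over an index range
lemma pvCount_eq_sum (total : Int) :
    ∀ (xs : List Int) (l : Int),
      pvCount total xs l
        = ((List.range xs.length).map
            (fun k => if l + (xs.take (k + 1)).sum ≥ total - (l + (xs.take (k + 1)).sum)
                      then (1 : Int) else 0)).sum := by
  intro xs
  induction xs with
  | nil => intro l; simp [pvCount]
  | cons x xs ih =>
      intro l
      rw [List.length_cons, List.range_succ_eq_map, List.map_cons, List.sum_cons, List.map_map]
      have hmap : (List.range xs.length).map
            ((fun k => if l + ((x :: xs).take (k + 1)).sum ≥ total - (l + ((x :: xs).take (k + 1)).sum)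
                       then (1 : Int) else 0) ∘ (· + 1))
          = (List.range xs.length).map
            (fun k => if (l + x) + (xs.take (k + 1)).sum ≥ total - ((l + x) + (xs.take (k + 1)).sum)
                      then (1 : Int) else 0) := by
        apply List.map_congr_left
        intro k _
        simp only [Function.comp, List.take_succ_cons, List.sum_cons]
        apply if_congr _ rfl rfl
        constructor <;> intro <;> omega
      rw [hmap, ← ih (l + x)]
      simp only [pvCount, List.take_succ_cons, List.take_zero, List.sum_cons, List.sum_nil]
      congr 1
      apply if_congr _ rfl rfl
      constructor <;> intro <;> omega

lemma take_of_dropLast (nums : List Int) (k : Nat) (hk : k + 1 ≤ nums.length - 1) :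
    (nums.dropLast.take (k + 1)) = nums.take (k + 1) := by
  rw [List.dropLast_eq_take, List.take_take]
  congr 1
  omega

theorem waysToSplitArray_eq (nums : List Int) :
    waysToSplitArray nums = waysToSplitArray_alt nums := by
  have htotal : nums.foldl (· + ·) 0 = nums.sum := by rw [List.sum_eq_foldl]
  simp only [waysToSplitArray, waysToSplitArray_alt, htotal]
  rw [pvB_loop]
  have hL : ∀ k, k < nums.length - 1 →
      ((List.range nums.length).foldl (pvLeftStep nums) (List.replicate nums.length 0)).getD k 0
        = pvPref nums k := by
    intro k hk
    exact pvLeft_getD nums nums.length (by omega) k (by omega)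
  have hR : ∀ k, k < nums.length - 1 →
      (((List.range nums.length).reverse).foldl (pvRightStep nums) (List.replicate nums.length 0)).getD (k + 1) 0
        = pvSuf nums (k + 1) := by
    intro k hk
    exact pvRight_getD nums nums.length (by omega) _ (by simp) (by intro j h1 h2; omega)
      (k + 1) (by omega)
  have hcong := PySem.List.foldl_congr_mem (List.range (nums.length - 1))
    (fun ans k =>
      if ((List.range nums.length).foldl (pvLeftStep nums) (List.replicate nums.length 0)).getD k 0
         ≥ (((List.range nums.length).reverse).foldl (pvRightStep nums) (List.replicate nums.length 0)).getD (k + 1) 0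
      then ans + 1 else ans)
    (fun (a : Int) k => a + (if (0 : Int) + (nums.dropLast.take (k + 1)).sum
                        ≥ nums.sum - ((0 : Int) + (nums.dropLast.take (k + 1)).sum)
                       then (1 : Int) else 0))
    0
    (by
      intro a k hk
      rw [List.mem_range] at hk
      dsimp only
      rw [hL k hk, hR k hk, take_of_dropLast nums k (by omega)]
      have hsuf : pvSuf nums (k + 1) = nums.sum - pvPref nums k := by
        rw [pvSuf_eq_total_sub]; rfl
      rw [hsuf]
      have hp : (0 : Int) + (nums.take (k + 1)).sum = pvPref nums k := by
        rw [pvPref]; ring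
      rw [hp]
      split <;> ring)
  rw [hcong, PySem.List.foldl_add, pvCount_eq_sum]
  have hlen : nums.dropLast.length = nums.length - 1 := by simp
  rw [hlen]

-- ===== VERDICT (by name: the statement is the Claim_ definition above) =====
theorem waysToSplitArray_spec : Claim_equal_waysToSplitArray := by
  intro nums _
  unfold Spec_waysToSplitArray
  exact waysToSplitArray_eq nums
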